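-- pv_equiv track=rewrite | github.com/AI-SSD/ai-ssd-patch-generation-and-validation | pipeline/cve_aggregator/modules/poc_repair.py | _classify_errors
-- ===== SOURCE A (Python) =====
-- from typing import Any, Dict, List, Optional, Tuple
--
-- def _classify_errors(errors: List[str], language: str) -> Dict[str, List[str]]:
--     """Classify compiler/validator errors into actionable categories.
--
--     Returns a dict with keys: 'scraping', 'missing_decl', 'platform', 'other'.
--     """
--     cats: Dict[str, List[str]] = {
--         "scraping": [], "missing_decl": [], "platform": [], "other": [],
--     }
--     if language != "c":
--         cats["other"] = list(errors)
--         return cats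
--
--     for e in errors:
--         lower = e.lower()
--         if "invalid preprocessing directive" in lower:
--             cats["scraping"].append(e)
--         elif "expected ';' after top level declarator" in lower and "from:" in lower:
--             cats["scraping"].append(e)
--         elif any(p in lower for p in [
--             "unknown type name", "use of undeclared identifier",
--             "no member named", "expected expression",
--         ]):
--             cats["missing_decl"].append(e)
--         elif "xcode" in lower or "macosx" in lower or "xcrun" in lower:
--             cats["platform"].append(e)
--         else:
--             cats["other"].append(e)
--     return cats
-- ===== SOURCE B (Python) =====
-- from typing import Dict, List
--
-- CATEGORY_KEYS = ["scraping", "missing_decl", "platform", "other"]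
--
-- def _category(e: str) -> str:
--     lower = e.lower()
--     if "invalid preprocessing directive" in lower:
--         return "scraping"
--     if "expected ';' after top level declarator" in lower and "from:" in lower:
--         return "scraping"
--     if any(p in lower for p in [
--         "unknown type name", "use of undeclared identifier",
--         "no member named", "expected expression",
--     ]):
--         return "missing_decl"
--     if "xcode" in lower or "macosx" in lower or "xcrun" in lower:
--         return "platform"
--     return "other"
--
-- def _classify_errors(errors: List[str], language: str) -> Dict[str, List[str]]:
--     if language != "c":
--         return {"scraping": [], "missing_decl": [], "platform": [], "other": list(errors)}
--     return {k: [e for e in errors if _category(e) == k] for k in CATEGORY_KEYS}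
-- ===== Notes on version B (the rewrite author's own statement) =====
-- stated objective: alternative
-- what changed: Replaces the single pass that mutates four dict-held lists with a pure classifier function plus a per-category filter comprehension building the dict directly (group-by-filter instead of appending).
import Mathlib
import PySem

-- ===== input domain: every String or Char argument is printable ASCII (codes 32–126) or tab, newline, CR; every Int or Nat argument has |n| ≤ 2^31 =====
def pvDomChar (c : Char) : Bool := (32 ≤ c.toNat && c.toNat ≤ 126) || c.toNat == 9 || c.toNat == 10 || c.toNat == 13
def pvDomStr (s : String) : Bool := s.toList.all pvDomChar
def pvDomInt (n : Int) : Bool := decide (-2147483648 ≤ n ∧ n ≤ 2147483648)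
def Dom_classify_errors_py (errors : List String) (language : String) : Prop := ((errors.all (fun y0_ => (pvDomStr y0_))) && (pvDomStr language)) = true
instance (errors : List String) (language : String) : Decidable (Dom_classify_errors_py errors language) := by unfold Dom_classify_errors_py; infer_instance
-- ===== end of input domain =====

-- B replaces the single mutating pass over four dict-held lists with a pure classifier plus per-category filters; same results (alternative decomposition, not faster).


-- ===== PORT A =====
-- literal transliteration of _classify_errors: build the dict of four empty lists, then one pass appending each error to its category's list
def classify_errors_py (errors : List String) (language : String) : List (String × List String) :=
  let cats : PySem.Dict String (List String) :=
    (((PySem.Dict.empty.insert "scraping" []).insert "missing_decl" []).insert "platform" []).insert "other" []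
  if language ≠ "c" then
    (cats.insert "other" errors).items
  else
    (errors.foldl (fun d e =>
      let lower := PySem.Str.lower e
      if PySem.Str.isIn "invalid preprocessing directive" lower then
        d.modify "scraping" [] (· ++ [e])
      else if PySem.Str.isIn "expected ';' after top level declarator" lower && PySem.Str.isIn "from:" lower then
        d.modify "scraping" [] (· ++ [e])
      else if (["unknown type name", "use of undeclared identifier",
                "no member named", "expected expression"].any
                 (fun p => PySem.Str.isIn p lower)) then
        d.modify "missing_decl" [] (· ++ [e])
      else if PySem.Str.isIn "xcode" lower || PySem.Str.isIn "macosx" lower || PySem.Str.isIn "xcrun" lower then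
        d.modify "platform" [] (· ++ [e])
      else
        d.modify "other" [] (· ++ [e])) cats).items

-- ===== PORT B =====
def categoryKeys : List String := ["scraping", "missing_decl", "platform", "other"]

-- port of Source B's _category: pure classifier returning the category key of one error
def category (e : String) : String :=
  let lower := PySem.Str.lower e
  if PySem.Str.isIn "invalid preprocessing directive" lower then "scraping"
  else if PySem.Str.isIn "expected ';' after top level declarator" lower && PySem.Str.isIn "from:" lower then "scraping"
  else if (["unknown type name", "use of undeclared identifier",
            "no member named", "expected expression"].any
             (fun p => PySem.Str.isIn p lower)) then "missing_decl"
  else if PySem.Str.isIn "xcode" lower || PySem.Str.isIn "macosx" lower || PySem.Str.isIn "xcrun" lower then "platform"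
  else "other"

def classify_errors_py_alt (errors : List String) (language : String) : List (String × List String) :=
  if language ≠ "c" then
    [("scraping", []), ("missing_decl", []), ("platform", []), ("other", errors)]
  else
    categoryKeys.map (fun k => (k, errors.filter (fun e => category e == k)))

-- ===== PRECONDITION & SPEC =====
def Spec_classify_errors_py (errors : List String) (language : String) (out : List (String × List String)) : Prop := out = classify_errors_py_alt errors language
instance (errors : List String) (language : String) (out : List (String × List String)) : Decidable (Spec_classify_errors_py errors language out) := by unfold Spec_classify_errors_py; infer_instance

-- ===== CLAIM (what is proved, stated in full; the proofs are below) =====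
def Claim_equal_classify_errors_py : Prop := ∀ (errors : List String) (language : String), Dom_classify_errors_py errors language → Spec_classify_errors_py errors language (classify_errors_py errors language)

-- ===== LEMMAS AND PROOFS =====

-- A's per-error step is exactly "append e to the list at key (category e)"
theorem step_eq_modify_category (d : PySem.Dict String (List String)) (e : String) :
    (let lower := PySem.Str.lower e
     if PySem.Str.isIn "invalid preprocessing directive" lower then
       d.modify "scraping" [] (· ++ [e])
     else if PySem.Str.isIn "expected ';' after top level declarator" lower && PySem.Str.isIn "from:" lower then
       d.modify "scraping" [] (· ++ [e])
     else if (["unknown type name", "use of undeclared identifier",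
               "no member named", "expected expression"].any
                (fun p => PySem.Str.isIn p lower)) then
       d.modify "missing_decl" [] (· ++ [e])
     else if PySem.Str.isIn "xcode" lower || PySem.Str.isIn "macosx" lower || PySem.Str.isIn "xcrun" lower then
       d.modify "platform" [] (· ++ [e])
     else
       d.modify "other" [] (· ++ [e])) = d.modify (category e) [] (· ++ [e]) := by
  simp only [category]
  split_ifs <;> rfl

theorem category_mem_keys (e : String) : category e ∈ categoryKeys := by
  unfold category categoryKeys
  dsimp only
  split_ifs <;> simp

theorem classify_errors_py_spec' (errors : List String) (language : String) :
    classify_errors_py errors language = classify_errors_py_alt errors language := by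
  unfold classify_errors_py classify_errors_py_alt
  by_cases hl : language ≠ "c"
  · rw [if_pos hl, if_pos hl]
    rfl
  · rw [if_neg hl, if_neg hl]
    have hfold : errors.foldl (fun d e =>
        let lower := PySem.Str.lower e
        if PySem.Str.isIn "invalid preprocessing directive" lower then
          d.modify "scraping" [] (· ++ [e])
        else if PySem.Str.isIn "expected ';' after top level declarator" lower && PySem.Str.isIn "from:" lower then
          d.modify "scraping" [] (· ++ [e])
        else if (["unknown type name", "use of undeclared identifier",
                  "no member named", "expected expression"].any
                   (fun p => PySem.Str.isIn p lower)) then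
          d.modify "missing_decl" [] (· ++ [e])
        else if PySem.Str.isIn "xcode" lower || PySem.Str.isIn "macosx" lower || PySem.Str.isIn "xcrun" lower then
          d.modify "platform" [] (· ++ [e])
        else
          d.modify "other" [] (· ++ [e]))
        ((((PySem.Dict.empty.insert "scraping" []).insert "missing_decl" []).insert "platform" []).insert "other" [])
      = errors.foldl (fun d e => d.modify (category e) [] (· ++ [e]))
        ((((PySem.Dict.empty.insert "scraping" []).insert "missing_decl" []).insert "platform" []).insert "other" []) := by
      exact PySem.List.foldl_congr_mem _ _ _ _ (fun d e _ => step_eq_modify_category d e)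
    rw [hfold]
    have hmap : errors.foldl (fun d e => d.modify (category e) [] (· ++ [e]))
        ((((PySem.Dict.empty.insert "scraping" []).insert "missing_decl" []).insert "platform" []).insert "other" [])
      = (errors.map (fun e => ((category e : String), e))).foldl (fun d p => d.modify p.1 [] (· ++ [p.2]))
        ((((PySem.Dict.empty.insert "scraping" []).insert "missing_decl" []).insert "platform" []).insert "other" []) := by
      rw [List.foldl_map]
    rw [hmap]
    set cats : PySem.Dict String (List String) :=
      (((PySem.Dict.empty.insert "scraping" []).insert "missing_decl" []).insert "platform" []).insert "other" [] with hcats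
    set l : List (String × String) := errors.map (fun e => ((category e : String), e)) with hl2
    have hkeys : ((l.foldl (fun d p => d.modify p.1 [] (· ++ [p.2])) cats)).keys = categoryKeys := by
      have h1 : ((l.foldl (fun d p => d.modify p.1 [] (· ++ [p.2])) cats)).keys
          = PySem.Set.update cats.keys (l.map Prod.fst) := by
        exact PySem.Dict.keys_foldl_modify_key l Prod.fst [] (fun _ p => (· ++ [p.2])) cats
      rw [h1]
      have hck : cats.keys = categoryKeys := by rw [hcats]; rfl
      rw [hck, PySem.Set.update_eq_append_filter]
      have : (PySem.Set.ofList (l.map Prod.fst)).filter (fun y => !(PySem.Set.contains categoryKeys y)) = [] := by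
        apply List.filter_eq_nil_iff.mpr
        intro y hy
        have hym : y ∈ l.map Prod.fst := (PySem.Set.mem_ofList _ _).mp hy
        obtain ⟨p, hp, rfl⟩ := List.mem_map.mp hym
        obtain ⟨e, _, rfl⟩ := List.mem_map.mp (by rw [hl2] at hp; exact hp)
        have := category_mem_keys e
        simp
        simpa using this
      rw [this, List.append_nil]
    have hnd : ((l.foldl (fun d p => d.modify p.1 [] (· ++ [p.2])) cats)).keys.Nodup := by
      rw [hkeys]; decide
    rw [PySem.Dict.items_eq_map_keys _ hnd ([] : List String), hkeys]
    rw [categoryKeys]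
    simp only [List.map_cons, List.map_nil, PySem.Dict.getD_foldl_modify_append]
    rw [hl2]
    simp only [List.filter_map, List.map_map]
    have hget : ∀ k : String,
        ((((PySem.Dict.empty.insert "scraping" ([] : List String)).insert "missing_decl" []).insert "platform" []).insert "other" []).getD k [] = [] := by
      intro k
      simp [PySem.Dict.getD_insert, PySem.Dict.getD_empty]
    rw [hcats]
    simp [hget]
    refine ⟨?_, ?_, ?_, ?_⟩ <;> simp [Function.comp_def]

-- ===== VERDICT (by name: the statement is the Claim_ definition above) =====
theorem classify_errors_py_spec : Claim_equal_classify_errors_py := by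
  intro errors language _
  exact classify_errors_py_spec' errors language
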